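-- pv_equiv track=rewrite | github.com/MyStraw/BAEKJOON | 프로그래머스/0/120956. 옹알이 （1）/옹알이 （1）.py | solution
-- ===== SOURCE A (Python) =====
-- def solution(babbling):
--     def bab(s):
--         words = ["aya", "ye", "woo", "ma"]
--         i = 0
--         last = ""
--
--         while i < len(s):
--             match = False
--             for word in words:
--                 if s[i:i+len(word)] == word and word != last:
--                     i += len(word)
--                     last = word
--                     match = True
--                     break
--             if not match:
--                 return False
--         return True
--
--     count = 0
--     for i in babbling:
--         if bab(i):
--             count += 1
--     return count
-- ===== SOURCE B (Python) =====
-- def solution(babbling):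
--     # Tokenize by first letter (the four words start with distinct letters, so the
--     # parse is unique), then reject on adjacent repeated tokens.
--     table = {'a': 'aya', 'y': 'ye', 'w': 'woo', 'm': 'ma'}
--
--     def tokens(s):
--         if not s:
--             return []
--         w = table.get(s[0])
--         if w is None or not s.startswith(w):
--             return None
--         rest = tokens(s[len(w):])
--         return None if rest is None else [w] + rest
--
--     def ok(s):
--         ts = tokens(s)
--         return ts is not None and all(x != y for x, y in zip(ts, ts[1:]))
--
--     return sum(1 for s in babbling if ok(s))
-- ===== Notes on version B (the rewrite author's own statement) =====
-- stated objective: alternative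
-- what changed: A interleaves matching and the no-repeat rule in one index-based while loop that scans the 4-word list at every step; B first tokenizes the string by a first-letter dict lookup (the parse is unique because the four words start with distinct letters), then separately checks full coverage and no adjacent repeated tokens with all/zip.
import Mathlib
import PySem

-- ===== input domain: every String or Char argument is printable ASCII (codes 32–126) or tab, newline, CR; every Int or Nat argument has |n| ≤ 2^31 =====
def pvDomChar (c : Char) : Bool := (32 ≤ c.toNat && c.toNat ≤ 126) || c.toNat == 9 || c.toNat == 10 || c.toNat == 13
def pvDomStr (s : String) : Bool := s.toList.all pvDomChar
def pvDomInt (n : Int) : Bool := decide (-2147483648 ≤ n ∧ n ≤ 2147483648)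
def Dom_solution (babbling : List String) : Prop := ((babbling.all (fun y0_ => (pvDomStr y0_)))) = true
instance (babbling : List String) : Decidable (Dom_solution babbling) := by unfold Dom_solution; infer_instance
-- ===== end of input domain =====

-- B replaces A's interleaved match-and-no-repeat while loop by a first-letter table
-- tokenizer followed by a separate adjacent-repeat check (one table probe per step instead of
-- scanning the word list; a timing run measured B faster by a constant factor).
-- Strings are represented by their character lists in the helpers.

-- ===== PORT A =====
-- words = ["aya", "ye", "woo", "ma"]
def pvWordsA : List (List Char) := ["aya".toList, "ye".toList, "woo".toList, "ma".toList]

-- the while loop of bab(s): state i (index) and last; the inner for-with-break is find?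
-- (first word with s[i:i+len(word)] == word and word != last).
-- Python's s[i:i+k] with 0 ≤ i is (s.drop i).take k (PySem.List.slice_natCast_add).
def babA (s : List Char) (i : Nat) (last : List Char) : Bool :=
  if h : i < s.length then
    match hf : pvWordsA.find? (fun w => decide ((s.drop i).take w.length = w) && decide (w ≠ last)) with
    | some w => babA s (i + w.length) w
    | none => false
  else true
termination_by s.length - i
decreasing_by
  have hm := List.mem_of_find?_eq_some hf
  have hw : 1 ≤ w.length := by
    simp [pvWordsA] at hm
    rcases hm with h1 | h1 | h1 | h1 <;> subst h1 <;> decide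
  omega

-- count = 0; for i in babbling: if bab(i): count += 1
def solution (babbling : List String) : Int :=
  babbling.foldl (fun count s => if babA s.toList 0 [] then count + 1 else count) 0

-- ===== PORT B =====
-- table = {'a': 'aya', 'y': 'ye', 'w': 'woo', 'm': 'ma'};  table.get(c)
def tokCharB (c : Char) : Option (List Char) :=
  if c = 'a' then some "aya".toList
  else if c = 'y' then some "ye".toList
  else if c = 'w' then some "woo".toList
  else if c = 'm' then some "ma".toList
  else none

-- used by tokensB's termination proof
theorem tokCharB_pos {c : Char} {w : List Char} (h : tokCharB c = some w) : 1 ≤ w.length := by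
  unfold tokCharB at h
  split_ifs at h <;> (cases Option.some.inj h; decide)

-- tokens(s): recursion on the suffix; s.startswith(w) is take w.length s = w
def tokensB : List Char → Option (List (List Char))
  | [] => some []
  | c :: rest =>
    match ht : tokCharB c with
    | none => none
    | some w =>
      if (c :: rest).take w.length = w then
        (tokensB ((c :: rest).drop w.length)).map (fun ts => w :: ts)
      else none
termination_by s => s.length
decreasing_by
  have := tokCharB_pos ht
  simp [List.length_drop]
  omega

-- all(x != y for x, y in zip(ts, ts[1:]))
def adjAllB (ts : List (List Char)) : Bool :=
  (ts.zip ts.tail).all (fun p => decide (p.1 ≠ p.2))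

-- ok(s)
def okB (s : List Char) : Bool :=
  match tokensB s with
  | none => false
  | some ts => adjAllB ts

-- sum(1 for s in babbling if ok(s))
def solution_alt (babbling : List String) : Int :=
  babbling.foldl (fun acc s => acc + if okB s.toList then 1 else 0) 0

-- ===== PRECONDITION & SPEC =====
def Spec_solution (babbling : List String) (out : Int) : Prop := out = solution_alt babbling
instance (babbling : List String) (out : Int) : Decidable (Spec_solution babbling out) := by unfold Spec_solution; infer_instance

-- ===== CLAIM (what is proved, stated in full; the proofs are below) =====
def Claim_equal_solution : Prop := ∀ (babbling : List String), Dom_solution babbling → Spec_solution babbling (solution babbling)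

-- ===== LEMMAS AND PROOFS =====

-- A's no-repeat rule folded into the token list, relative to the previous word `last`
def noRep : List Char → List (List Char) → Bool
  | _, [] => true
  | last, w :: ts => decide (w ≠ last) && noRep w ts

-- unfolding equation for tokensB on a cons (the dependent match unfolded)
theorem tokensB_cons (c : Char) (r : List Char) :
    tokensB (c :: r) = (match tokCharB c with
      | none => none
      | some w =>
        if (c :: r).take w.length = w then
          (tokensB ((c :: r).drop w.length)).map (fun ts => w :: ts)
        else none) := by
  rw [tokensB]
  split
  · next heq => rw [heq]
  · next w heq => rw [heq]

-- the inner for-with-break, expressed through the first-letter table: at a nonempty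
-- suffix c :: r at most one word can match (the four words start with distinct letters)
theorem findA_eq (c : Char) (r last : List Char) :
    pvWordsA.find? (fun w => decide (((c :: r).take w.length = w)) && decide (w ≠ last))
      = match tokCharB c with
        | none => none
        | some w => if (c :: r).take w.length = w ∧ w ≠ last then some w else none := by
  by_cases ha : c = 'a' <;> by_cases hy : c = 'y' <;> by_cases hw : c = 'w' <;>
    by_cases hm : c = 'm' <;>
    simp_all [pvWordsA, List.find?, tokCharB, List.take_succ_cons] <;>
    (try split_ifs) <;> (try split) <;> simp_all

theorem noRep_eq_adj (last : List Char) (ts : List (List Char)) :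
    noRep last ts = ((match ts with | [] => true | w :: _ => decide (w ≠ last)) && adjAllB ts) := by
  induction ts generalizing last with
  | nil => rfl
  | cons w ts ih =>
    cases ts with
    | nil => simp [noRep, adjAllB]
    | cons x ts' =>
      have hz : adjAllB (w :: x :: ts') = (decide (w ≠ x) && adjAllB (x :: ts')) := by
        simp [adjAllB, List.zip]
      have hxw : (decide (x ≠ w)) = (decide (w ≠ x)) := by
        simp only [decide_eq_decide]; exact ne_comm
      show (decide (w ≠ last) && noRep w (x :: ts')) = _
      rw [ih w, hz]
      show (decide (w ≠ last) && (decide (x ≠ w) && adjAllB (x :: ts'))) =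
           (decide (w ≠ last) && (decide (w ≠ x) && adjAllB (x :: ts')))
      rw [hxw]

theorem tokensB_head_ne_nil {s : List Char} {w : List Char} {ts : List (List Char)}
    (h : tokensB s = some (w :: ts)) : w ≠ [] := by
  cases s with
  | nil => simp [tokensB] at h
  | cons c r =>
    rw [tokensB] at h
    split at h
    · simp at h
    · next w' ht =>
      split at h
      · obtain ⟨ts0, _, heq⟩ := Option.map_eq_some_iff.mp h
        cases heq
        have := tokCharB_pos ht
        intro hnil; subst hnil; simp at this
      · simp at h

-- main loop invariant: A's while loop equals "tokenize the remaining suffix, then noRep"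
theorem babA_eq (n : Nat) : ∀ (s : List Char) (i : Nat) (last : List Char),
    s.length - i ≤ n →
    babA s i last = (match tokensB (s.drop i) with
                     | none => false
                     | some ts => noRep last ts) := by
  induction n with
  | zero =>
    intro s i last hn
    have hge : s.length ≤ i := by omega
    rw [babA]
    simp [dif_neg (by omega : ¬ i < s.length), List.drop_eq_nil_of_le hge, tokensB, noRep]
  | succ n ih =>
    intro s i last hn
    by_cases h : i < s.length
    · have hdrop : s.drop i = s[i] :: s.drop (i + 1) := (List.getElem_cons_drop h).symm
      rw [babA]
      simp only [dif_pos h]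
      rw [hdrop, findA_eq, tokensB_cons]
      cases htc : tokCharB s[i] with
      | none => rfl
      | some w =>
        simp only
        by_cases hmatch : (s[i] :: s.drop (i + 1)).take w.length = w
        · have hww : 1 ≤ w.length := tokCharB_pos htc
          have hdd : (s[i] :: s.drop (i + 1)).drop w.length = s.drop (i + w.length) := by
            rw [← hdrop, List.drop_drop]
          by_cases hlast : w ≠ last
          · rw [if_pos ⟨hmatch, hlast⟩, if_pos hmatch, hdd]
            show babA s (i + w.length) w = _
            rw [ih s (i + w.length) w (by omega)]
            cases tokensB (s.drop (i + w.length)) with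
            | none => rfl
            | some ts => simp [noRep, hlast]
          · rw [if_neg (by tauto), if_pos hmatch]
            rw [not_not] at hlast
            cases tokensB ((s[i] :: s.drop (i + 1)).drop w.length) with
            | none => rfl
            | some ts => simp [noRep, hlast]
        · rw [if_neg (by tauto), if_neg hmatch]
    · rw [babA]
      simp [dif_neg h, List.drop_eq_nil_of_le (by omega : s.length ≤ i), tokensB, noRep]

theorem bab_eq_ok (s : List Char) : babA s 0 [] = okB s := by
  rw [babA_eq (s.length) s 0 [] (by omega), List.drop_zero, okB]
  cases hts : tokensB s with
  | none => rfl
  | some ts =>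
    simp only
    rw [noRep_eq_adj]
    cases ts with
    | nil => simp [adjAllB]
    | cons w ts' =>
      have hne : w ≠ [] := tokensB_head_ne_nil hts
      simp [hne]

-- ===== VERDICT (by name: the statement is the Claim_ definition above) =====
theorem solution_spec : Claim_equal_solution := by
  intro babbling _
  unfold Spec_solution solution solution_alt
  have hf : (fun (count : Int) (s : String) => if babA s.toList 0 [] then count + 1 else count)
          = (fun (acc : Int) (s : String) => acc + if okB s.toList then 1 else 0) := by
    funext c s
    rw [bab_eq_ok]
    cases okB s.toList <;> simp
  rw [hf]
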